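-- pv_equiv track=rewrite | github.com/MNINiro/Python | Problems & solutions/11-Sequence of continous 1s.py | findIndexofZero
-- ===== SOURCE A (Python) =====
-- def findIndexofZero(A):
--     max_count = 0  # stores maximum number of 1's (including 0)
--     max_index = -1  # stores index of 0 to be replaced
--
--     prev_zero_index = -1  # stores index of previous zero
--     count = 0  # stores current count of zeros
--
--     # consider each index `i` in the list
--     for i in range(len(A)):
--
--         # if the current element is 1
--         if A[i] == 1:
--             count = count + 1
--
--         else:
--             # if the current element is 0
--             # reset count to 1 + number of ones to the left of current 0
--             count = i - prev_zero_index
--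
--             # update `prev_zero_index` to the current index
--             prev_zero_index = i
--
--         # update maximum count and index of 0 to be replaced if required
--         if count > max_count:
--             max_count = count
--             max_index = prev_zero_index
--
--     # return index of 0 to be replaced or -1 if the list contains all 1's
--     return max_index
-- ===== SOURCE B (Python) =====
-- def findIndexofZero(A):
--     # gap-table approach: list every zero position, then scan gaps between neighbours
--     zeros = [i for i, x in enumerate(A) if x != 1]
--     best_index, best_count = -1, 0
--     prev = -1
--     for z, nxt in zip(zeros, zeros[1:] + [len(A)]):
--         count = nxt - prev - 1
--         if count > best_count:
--             best_count, best_index = count, z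
--         prev = z
--     return best_index
-- ===== Notes on version B (the rewrite author's own statement) =====
-- stated objective: alternative
-- what changed: A is a single stateful left-to-right sweep updating a running count at every element; B first builds the table of zero positions and then scans only the gaps between neighbouring zeros (with sentinels -1 and len(A)), computing each candidate as nxt-prev-1.
import Mathlib
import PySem

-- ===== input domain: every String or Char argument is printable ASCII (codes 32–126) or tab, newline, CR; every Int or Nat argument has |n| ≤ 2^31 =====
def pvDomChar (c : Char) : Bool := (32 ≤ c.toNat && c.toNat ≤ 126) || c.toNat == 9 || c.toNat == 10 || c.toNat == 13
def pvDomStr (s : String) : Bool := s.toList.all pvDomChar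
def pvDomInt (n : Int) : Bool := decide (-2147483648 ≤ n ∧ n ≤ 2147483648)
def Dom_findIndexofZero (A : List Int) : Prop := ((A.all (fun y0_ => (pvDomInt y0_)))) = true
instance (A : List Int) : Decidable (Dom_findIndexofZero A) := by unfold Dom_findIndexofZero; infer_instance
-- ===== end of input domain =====

-- B replaces A's single stateful sweep by a zero-position table followed by a scan of the
-- gaps between neighbouring zeros (objective: alternative decomposition, same cost).

-- ===== PORT A =====
-- one step per index i: update count/prev, then the running maximum (strict >)
def loopA : List Int → Int → Int → Int → Int → Int → Int
  | [], _, _, max_index, _, _ => max_index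
  | x :: rest, i, max_count, max_index, prev_zero_index, count =>
    if x = 1 then
      let count' := count + 1
      if count' > max_count then loopA rest (i+1) count' prev_zero_index prev_zero_index count'
      else loopA rest (i+1) max_count max_index prev_zero_index count'
    else
      let count' := i - prev_zero_index
      if count' > max_count then loopA rest (i+1) count' i i count'
      else loopA rest (i+1) max_count max_index i count'

def findIndexofZero (A : List Int) : Int := loopA A 0 0 (-1) (-1) 0

-- ===== PORT B =====
-- indices of the non-1 elements ("zeros"), in order
def zerosOf : List Int → Int → List Int
  | [], _ => []
  | x :: rest, i => if x = 1 then zerosOf rest (i+1) else i :: zerosOf rest (i+1)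

-- the for-loop over zip(zeros, zeros[1:] + [len(A)])
def loopB : List (Int × Int) → Int → Int → Int → Int
  | [], _, best_index, _ => best_index
  | (z, nxt) :: rest, prev, best_index, best_count =>
    let count := nxt - prev - 1
    if count > best_count then loopB rest z z count
    else loopB rest z best_index best_count

def findIndexofZero_alt (A : List Int) : Int :=
  let zs := zerosOf A 0
  loopB (zs.zip (zs.drop 1 ++ [(A.length : Int)])) (-1) (-1) 0

-- ===== PRECONDITION & SPEC =====
def Spec_findIndexofZero (A : List Int) (out : Int) : Prop := out = findIndexofZero_alt A
instance (A : List Int) (out : Int) : Decidable (Spec_findIndexofZero A out) := by unfold Spec_findIndexofZero; infer_instance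

-- ===== CLAIM (what is proved, stated in full; the proofs are below) =====
def Claim_equal_findIndexofZero : Prop := ∀ (A : List Int), Dom_findIndexofZero A → Spec_findIndexofZero A (findIndexofZero A)

-- ===== LEMMAS AND PROOFS =====

-- position of the first zero of xs (absolute, xs starting at index i), or i + |xs|
def fz (xs : List Int) (i : Int) : Int := (zerosOf xs i).headD (i + (xs.length : Int))

-- the zip list B's loop runs over, for suffix xs starting at index i
def mkzip (xs : List Int) (i : Int) : List (Int × Int) :=
  (zerosOf xs i).zip ((zerosOf xs i).drop 1 ++ [i + (xs.length : Int)])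

theorem zerosOf_bounds : ∀ (xs : List Int) (i z : Int), z ∈ zerosOf xs i → i ≤ z ∧ z < i + (xs.length : Int) := by
  intro xs
  induction xs with
  | nil => intro i z h; simp [zerosOf] at h
  | cons x rest ih =>
    intro i z h
    simp only [zerosOf] at h
    split at h
    · have := ih (i+1) z h
      simp only [List.length_cons]
      push_cast
      omega
    · rcases List.mem_cons.mp h with h | h
      · subst h; simp only [List.length_cons]; push_cast; omega
      · have := ih (i+1) z h
        simp only [List.length_cons]; push_cast; omega

theorem fz_lb : ∀ (xs : List Int) (i : Int), i ≤ fz xs i := by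
  intro xs i
  unfold fz
  cases h : zerosOf xs i with
  | nil => simp
  | cons z t =>
    have := zerosOf_bounds xs i z (by rw [h]; exact List.mem_cons_self)
    simpa using this.1

-- main invariant: A's sweep from any coherent mid-state equals B's gap scan,
-- with the pending partial run folded into the initial best
theorem loopA_eq : ∀ (xs : List Int) (i mc mi prev count : Int), count ≤ mc → 0 ≤ mc →
    loopA xs i mc mi prev count =
      loopB (mkzip xs i) prev
        (if count + fz xs i - i > mc then prev else mi)
        (if count + fz xs i - i > mc then count + fz xs i - i else mc) := by
  intro xs
  induction xs with
  | nil =>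
    intro i mc mi prev count h1 h2
    have hfz : fz ([] : List Int) i = i := by simp [fz, zerosOf]
    rw [hfz]
    simp only [loopA, mkzip, zerosOf, List.zip_nil_left, loopB]
    rw [if_neg (by omega)]
  | cons x rest ih =>
    intro i mc mi prev count h1 h2
    have hF := fz_lb rest (i+1)
    by_cases hx : x = 1
    · -- element is 1
      have hz : zerosOf (x :: rest) i = zerosOf rest (i+1) := by simp [zerosOf, hx]
      have hfz : fz (x :: rest) i = fz rest (i+1) := by
        unfold fz
        rw [hz]
        cases h : zerosOf rest (i+1) with
        | nil => simp [List.length_cons]; ring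
        | cons a t => simp
      have hzip : mkzip (x :: rest) i = mkzip rest (i+1) := by
        unfold mkzip
        rw [hz]
        congr 2
        simp [List.length_cons]; ring
      rw [hfz, hzip]
      simp only [loopA]
      rw [if_pos hx]
      by_cases hc : count + 1 > mc
      · rw [if_pos hc, ih (i+1) (count+1) prev prev (count+1) le_rfl (by omega)]
        have e1 : (if count + 1 + fz rest (i + 1) - (i + 1) > count + 1 then prev else prev) =
            (if count + fz rest (i + 1) - i > mc then prev else mi) := by
          split_ifs with h h' h' <;> first | rfl | (exfalso; omega)
        have e2 : (if count + 1 + fz rest (i + 1) - (i + 1) > count + 1 then count + 1 + fz rest (i + 1) - (i + 1) else count + 1) =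
            (if count + fz rest (i + 1) - i > mc then count + fz rest (i + 1) - i else mc) := by
          split_ifs <;> omega
        rw [e1, e2]
      · rw [if_neg hc, ih (i+1) mc mi prev (count+1) (by omega) h2]
        have e1 : (if count + 1 + fz rest (i + 1) - (i + 1) > mc then prev else mi) =
            (if count + fz rest (i + 1) - i > mc then prev else mi) := by
          split_ifs with h h' h' <;> first | rfl | (exfalso; omega)
        have e2 : (if count + 1 + fz rest (i + 1) - (i + 1) > mc then count + 1 + fz rest (i + 1) - (i + 1) else mc) =
            (if count + fz rest (i + 1) - i > mc then count + fz rest (i + 1) - i else mc) := by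
          split_ifs <;> omega
        rw [e1, e2]
    · -- element is a "zero"
      have hz : zerosOf (x :: rest) i = i :: zerosOf rest (i+1) := by simp [zerosOf, hx]
      have hfz : fz (x :: rest) i = i := by unfold fz; rw [hz]; simp
      have hn : i + ((x :: rest).length : Int) = (i+1) + (rest.length : Int) := by
        simp [List.length_cons]; ring
      have hzip : mkzip (x :: rest) i = (i, fz rest (i+1)) :: mkzip rest (i+1) := by
        unfold mkzip
        rw [hz, hn]
        cases h : zerosOf rest (i+1) with
        | nil => simp [fz, h, List.zip]
        | cons a t => simp [fz, h, List.zip]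
      rw [hzip, hfz]
      have hpend : ¬ (count + i - i > mc) := by omega
      rw [if_neg hpend, if_neg hpend]
      simp only [loopB, loopA]
      rw [if_neg hx]
      by_cases hc : i - prev > mc
      · rw [if_pos hc, ih (i+1) (i - prev) i i (i - prev) le_rfl (by omega)]
        rw [if_pos (show fz rest (i+1) - prev - 1 > mc by omega)]
        have e1 : (if i - prev + fz rest (i + 1) - (i + 1) > i - prev then i else i) = i := by
          split_ifs <;> rfl
        have e2 : (if i - prev + fz rest (i + 1) - (i + 1) > i - prev then i - prev + fz rest (i + 1) - (i + 1) else i - prev) =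
            fz rest (i+1) - prev - 1 := by
          split_ifs <;> omega
        rw [e1, e2]
      · rw [if_neg hc, ih (i+1) mc mi i (i - prev) (by omega) h2]
        by_cases hcB : fz rest (i+1) - prev - 1 > mc
        · rw [if_pos hcB]
          have e1 : (if i - prev + fz rest (i + 1) - (i + 1) > mc then i else mi) = i := by
            rw [if_pos (by omega)]
          have e2 : (if i - prev + fz rest (i + 1) - (i + 1) > mc then i - prev + fz rest (i + 1) - (i + 1) else mc) =
              fz rest (i+1) - prev - 1 := by
            rw [if_pos (by omega)]; omega
          rw [e1, e2]
        · rw [if_neg hcB]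
          have e1 : (if i - prev + fz rest (i + 1) - (i + 1) > mc then i else mi) = mi := by
            rw [if_neg (by omega)]
          have e2 : (if i - prev + fz rest (i + 1) - (i + 1) > mc then i - prev + fz rest (i + 1) - (i + 1) else mc) = mc := by
            rw [if_neg (by omega)]
          rw [e1, e2]

theorem zerosOf_head_lt : ∀ (xs : List Int) (i z w : Int) (t : List Int),
    zerosOf xs i = z :: w :: t → z < w := by
  intro xs
  induction xs with
  | nil => intro i z w t h; simp [zerosOf] at h
  | cons x rest ih =>
    intro i z w t h
    simp only [zerosOf] at h
    split at h
    · exact ih (i+1) z w t h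
    · rcases List.cons_eq_cons.mp h with ⟨hz, ht⟩
      subst hz
      have hw : w ∈ zerosOf rest (i+1) := by rw [ht]; exact List.mem_cons_self
      have := zerosOf_bounds rest (i+1) w hw
      omega

-- the initial best_count may start at fz A 0 instead of 0: the first gap beats both
theorem loopB_start (A : List Int) :
    loopB (mkzip A 0) (-1) (-1) (fz A 0) = loopB (mkzip A 0) (-1) (-1) 0 := by
  cases h : zerosOf A 0 with
  | nil => simp [mkzip, h, loopB]
  | cons z0 t =>
    have hz0 := zerosOf_bounds A 0 z0 (by rw [h]; exact List.mem_cons_self)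
    have hfz : fz A 0 = z0 := by unfold fz; rw [h]; simp
    -- compute the head of the zip and the comparison value nxt
    rcases ht : t with _ | ⟨w, t'⟩
    · have hzip : mkzip A 0 = [(z0, (A.length : Int))] := by
        unfold mkzip; rw [h, ht]; simp [List.zip]
      rw [hzip, hfz]
      simp only [loopB]
      rw [if_pos (by omega), if_pos (by omega)]
    · have hw : z0 < w := by
        refine zerosOf_head_lt A 0 z0 w t' ?_
        rw [h, ht]
      have hzip : ∃ rest', mkzip A 0 = (z0, w) :: rest' := by
        unfold mkzip; rw [h, ht]; simp [List.zip]
      rcases hzip with ⟨rest', hzip⟩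
      rw [hzip, hfz]
      simp only [loopB]
      rw [if_pos (by omega), if_pos (by omega)]

-- ===== VERDICT (by name: the statement is the Claim_ definition above) =====
theorem findIndexofZero_spec : Claim_equal_findIndexofZero := by
  intro A _
  unfold Spec_findIndexofZero findIndexofZero findIndexofZero_alt
  show loopA A 0 0 (-1) (-1) 0 =
    loopB ((zerosOf A 0).zip (List.drop 1 (zerosOf A 0) ++ [(A.length : Int)])) (-1) (-1) 0
  have hzipeq : mkzip A 0 = (zerosOf A 0).zip (List.drop 1 (zerosOf A 0) ++ [(A.length : Int)]) := by
    unfold mkzip; norm_num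
  rw [← hzipeq, loopA_eq A 0 0 (-1) (-1) 0 le_rfl le_rfl]
  by_cases hp : 0 + fz A 0 - 0 > 0
  · rw [if_pos hp, if_pos hp, show 0 + fz A 0 - 0 = fz A 0 by ring, loopB_start]
  · rw [if_neg hp, if_neg hp]
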